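-- pv_equiv track=rewrite | github.com/jenny-jione/programmers | KAKAO/2020_KAKAO_INTERNSHIP/press_keypad.py | solution
-- ===== SOURCE A (Python) =====
-- def solution(numbers, hand):
--     answer = ''
--     # 무조건 L: 1, 4, 7
--     # 무조건 R: 3, 6, 9
--     # 현재 위치에서 가까운 손: 2, 5, 8, 0
--     # 만약 거리가 같다면 주 손으로 선택.
--     # 관건: 현재 위치에서 목표 위치까지의 거리 계산하기.
--     # 2) 현재 위치를 업데이트 시키기.
--
--     # 2~9 거리: (9-2)%3 == 1, (9-2)//3 == 2 -> 거리: 3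
--     # 2~8 거리: (8-2)%3 == 0, (8-2)//3 == 2 -> 거리: 2
--     # 3~9 거리: (9-3)%3 == 0, (9-3)//3 == 2 -> 거리: 2
--     # 따라서 거리는 나머지+몫
--
--     # 키패드 0은 11로 바꾸어 계산한다.
--     cur_l = 10
--     cur_r = 12
--
--     for n in numbers:
--         if n == 0:
--             n = 11
--         if n in [1, 4, 7]:
--             cur_l = n
--             answer += 'L'
--         elif n in [3, 6, 9]:
--             cur_r = n
--             answer += 'R'
--         else:
--             dl = abs(cur_l-n)%3 + abs(cur_l-n)//3
--             dr = abs(cur_r-n)%3 + abs(cur_r-n)//3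
--             if dl < dr:
--                 cur_l = n
--                 answer += 'L'
--             elif dr < dl:
--                 cur_r = n
--                 answer += 'R'
--             else:
--                 if hand == 'left':
--                     cur_l = n
--                     answer += 'L'
--                 else:
--                     cur_r = n
--                     answer += 'R'
--
--     return answer
-- ===== SOURCE B (Python) =====
-- # Stateless-hands alternative: instead of maintaining current hand positions, B logs
-- # every press as (key, label) and rediscovers each thumb's position by scanning the
-- # press log backwards at each near-hand key (O(n^2) log scan vs A's O(n) state).
-- def solution(numbers, hand):
--     def dist(a, b):
--         q, r = divmod(abs(a - b), 3)
--         return q + r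
--
--     def last_key(pressed, h, default):
--         for k, c in reversed(pressed):
--             if c == h:
--                 return k
--         return default
--
--     pressed = []
--     for n in numbers:
--         k = 11 if n == 0 else n
--         if k in (1, 4, 7):
--             c = 'L'
--         elif k in (3, 6, 9):
--             c = 'R'
--         else:
--             dl = dist(last_key(pressed, 'L', 10), k)
--             dr = dist(last_key(pressed, 'R', 12), k)
--             c = 'L' if dl < dr or (dl == dr and hand == 'left') else 'R'
--         pressed.append((k, c))
--     return ''.join(c for _, c in pressed)
-- ===== Notes on version B (the rewrite author's own statement) =====
-- stated objective: alternative
-- what changed: B keeps no current hand positions: it records every press as a (key, label) log and, at each near-hand key, rediscovers each thumb's position by scanning the press log backwards for that hand's last key (falling back to the * / # start), so the O(1) carried state of A is replaced by O(n) history scans.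
import Mathlib
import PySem

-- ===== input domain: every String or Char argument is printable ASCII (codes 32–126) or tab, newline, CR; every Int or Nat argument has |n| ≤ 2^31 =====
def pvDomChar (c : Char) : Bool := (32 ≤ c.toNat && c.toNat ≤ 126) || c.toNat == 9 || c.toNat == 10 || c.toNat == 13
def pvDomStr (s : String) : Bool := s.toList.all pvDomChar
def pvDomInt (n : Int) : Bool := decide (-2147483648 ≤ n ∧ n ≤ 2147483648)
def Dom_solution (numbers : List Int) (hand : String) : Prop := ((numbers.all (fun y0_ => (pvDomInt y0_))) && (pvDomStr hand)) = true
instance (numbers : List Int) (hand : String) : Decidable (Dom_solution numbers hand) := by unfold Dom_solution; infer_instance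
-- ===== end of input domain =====

-- B drops the carried hand positions: it logs every press as (key, label) and, at each
-- near-hand key, rediscovers each thumb's position by scanning the press log backwards
-- (alternative decomposition; O(n^2) log scans instead of A's O(n) carried state).

-- ===== PORT A =====
-- the for-loop of A, carrying (cur_l, cur_r, answer); abs(x) ≥ 0, so Python's % and //
-- on it agree exactly with Nat % and / on natAbs
def solLoopA (hand : String) : List Int → Int → Int → String → String
  | [], _, _, answer => answer
  | n0 :: rest, cur_l, cur_r, answer =>
    let n : Int := if n0 = 0 then 11 else n0
    if n ∈ ([1, 4, 7] : List Int) then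
      solLoopA hand rest n cur_r (answer ++ "L")
    else if n ∈ ([3, 6, 9] : List Int) then
      solLoopA hand rest cur_l n (answer ++ "R")
    else
      let dl : Nat := (cur_l - n).natAbs % 3 + (cur_l - n).natAbs / 3
      let dr : Nat := (cur_r - n).natAbs % 3 + (cur_r - n).natAbs / 3
      if dl < dr then solLoopA hand rest n cur_r (answer ++ "L")
      else if dr < dl then solLoopA hand rest cur_l n (answer ++ "R")
      else if hand = "left" then solLoopA hand rest n cur_r (answer ++ "L")
      else solLoopA hand rest cur_l n (answer ++ "R")

def solution (numbers : List Int) (hand : String) : String :=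
  solLoopA hand numbers 10 12 ""

-- ===== PORT B =====
-- Source B's dist: divmod(abs(a-b), 3) gives (q, r) = (//, %); abs ≥ 0, so Nat / and %
def distB (a b : Int) : Nat := (a - b).natAbs / 3 + (a - b).natAbs % 3

-- Source B's last_key: the for-loop over reversed(pressed)
def lastKeyRev : List (Int × Char) → Char → Int → Int
  | [], _, d => d
  | (k, c) :: rest, h, d => if c = h then k else lastKeyRev rest h d

def lastKey (pressed : List (Int × Char)) (h : Char) (d : Int) : Int :=
  lastKeyRev pressed.reverse h d

-- Source B's main loop, carrying only the press log
def solLoopB (hand : String) : List Int → List (Int × Char) → List (Int × Char)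
  | [], pressed => pressed
  | n0 :: rest, pressed =>
    let k : Int := if n0 = 0 then 11 else n0
    let c : Char :=
      if k ∈ ([1, 4, 7] : List Int) then 'L'
      else if k ∈ ([3, 6, 9] : List Int) then 'R'
      else
        let dl := distB (lastKey pressed 'L' 10) k
        let dr := distB (lastKey pressed 'R' 12) k
        if dl < dr ∨ (dl = dr ∧ hand = "left") then 'L' else 'R'
    solLoopB hand rest (pressed ++ [(k, c)])

-- ''.join(c for _, c in pressed)
def solution_alt (numbers : List Int) (hand : String) : String :=
  String.ofList ((solLoopB hand numbers []).map Prod.snd)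

-- ===== PRECONDITION & SPEC =====
def Spec_solution (numbers : List Int) (hand : String) (out : String) : Prop := out = solution_alt numbers hand
instance (numbers : List Int) (hand : String) (out : String) : Decidable (Spec_solution numbers hand out) := by unfold Spec_solution; infer_instance

-- ===== CLAIM =====
def Claim_equal_solution : Prop := ∀ (numbers : List Int) (hand : String), Dom_solution numbers hand → Spec_solution numbers hand (solution numbers hand)

-- ===== LEMMAS AND PROOFS =====

lemma appL (acc : List Char) : String.ofList acc ++ "L" = String.ofList (acc ++ ['L']) := by
  rw [show ("L" : String) = String.ofList ['L'] by decide, String.ofList_append]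

lemma appR (acc : List Char) : String.ofList acc ++ "R" = String.ofList (acc ++ ['R']) := by
  rw [show ("R" : String) = String.ofList ['R'] by decide, String.ofList_append]

lemma lastKey_snoc (p : List (Int × Char)) (k : Int) (c h : Char) (d : Int) :
    lastKey (p ++ [(k, c)]) h d = if c = h then k else lastKey p h d := by
  simp only [lastKey, List.reverse_append, List.reverse_singleton, List.singleton_append,
    lastKeyRev]

-- main invariant: A's carried positions are exactly what B rediscovers from its press log
lemma loop_eq (hand : String) : ∀ (ns : List Int) (pressed : List (Int × Char)) (cl cr : Int),
    lastKey pressed 'L' 10 = cl → lastKey pressed 'R' 12 = cr →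
    solLoopA hand ns cl cr (String.ofList (pressed.map Prod.snd))
      = String.ofList ((solLoopB hand ns pressed).map Prod.snd) := by
  intro ns
  induction ns with
  | nil => intro pressed cl cr _ _; simp [solLoopA, solLoopB]
  | cons n0 rest ih =>
    intro pressed cl cr hL hR
    simp only [solLoopA, solLoopB]
    set k : Int := if n0 = 0 then 11 else n0 with hk
    have hmapL : (pressed ++ [(k, 'L')]).map Prod.snd = pressed.map Prod.snd ++ ['L'] := by simp
    have hmapR : (pressed ++ [(k, 'R')]).map Prod.snd = pressed.map Prod.snd ++ ['R'] := by simp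
    have hLL : lastKey (pressed ++ [(k, 'L')]) 'L' 10 = k := by simp [lastKey_snoc]
    have hLR : lastKey (pressed ++ [(k, 'L')]) 'R' 12 = cr := by simp [lastKey_snoc, hR]
    have hRL : lastKey (pressed ++ [(k, 'R')]) 'L' 10 = cl := by simp [lastKey_snoc, hL]
    have hRR : lastKey (pressed ++ [(k, 'R')]) 'R' 12 = k := by simp [lastKey_snoc]
    by_cases h1 : k ∈ ([1, 4, 7] : List Int)
    · simp only [if_pos h1, appL]
      rw [← hmapL]; exact ih _ k cr hLL hLR
    · simp only [if_neg h1]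
      by_cases h2 : k ∈ ([3, 6, 9] : List Int)
      · simp only [if_pos h2, appR]
        rw [← hmapR]; exact ih _ cl k hRL hRR
      · simp only [if_neg h2, hL, hR]
        have ecl : distB cl k = (cl - k).natAbs % 3 + (cl - k).natAbs / 3 := by
          simp [distB, Nat.add_comm]
        have ecr : distB cr k = (cr - k).natAbs % 3 + (cr - k).natAbs / 3 := by
          simp [distB, Nat.add_comm]
        set dl : Nat := (cl - k).natAbs % 3 + (cl - k).natAbs / 3 with hdl
        set dr : Nat := (cr - k).natAbs % 3 + (cr - k).natAbs / 3 with hdr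
        rw [ecl, ecr]
        by_cases hlt : dl < dr
        · have hc : dl < dr ∨ (dl = dr ∧ hand = "left") := Or.inl hlt
          simp only [if_pos hlt, if_pos hc, appL]
          rw [← hmapL]; exact ih _ k cr hLL hLR
        · by_cases hgt : dr < dl
          · have hneg : ¬(dl < dr ∨ (dl = dr ∧ hand = "left")) := by
              rintro (h | ⟨h, _⟩)
              · exact hlt h
              · exact absurd (h ▸ hgt) (lt_irrefl _)
            simp only [if_neg hlt, if_pos hgt, if_neg hneg, appR]
            rw [← hmapR]; exact ih _ cl k hRL hRR
          · have heq : dl = dr := Nat.le_antisymm (Nat.le_of_not_lt hgt) (Nat.le_of_not_lt hlt)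
            by_cases hh : hand = "left"
            · have hc : dl < dr ∨ (dl = dr ∧ hand = "left") := Or.inr ⟨heq, hh⟩
              simp only [if_neg hlt, if_neg hgt, if_pos hh, if_pos hc, appL]
              rw [← hmapL]; exact ih _ k cr hLL hLR
            · have hneg : ¬(dl < dr ∨ (dl = dr ∧ hand = "left")) := by
                rintro (h | ⟨_, h⟩)
                · exact hlt h
                · exact hh h
              simp only [if_neg hlt, if_neg hgt, if_neg hh, if_neg hneg, appR]
              rw [← hmapR]; exact ih _ cl k hRL hRR

-- ===== VERDICT =====
theorem solution_spec : Claim_equal_solution := by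
  intro numbers hand _
  unfold Spec_solution solution solution_alt
  have h := loop_eq hand numbers [] 10 12 rfl rfl
  rw [show ("" : String) = String.ofList [] by decide]
  simpa using h
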